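-- pv_equiv track=rewrite | github.com/z00logist/generated-vs-actual-reviews | src/complexity_model_apapted/Metrics/feature_extractor.py | Cohes_1
-- ===== SOURCE A (Python) =====
-- def Cohes_1(words):
--     wsw = [[[item['lemma'],item['pos']] for item in snt] for snt in words]
--     n = 0
--     for i in range(len(wsw)-1):
--         ws1 = [k[0] for k in wsw[i] if k[1]=='NOUN']
--         ws2 = [k[0] for k in wsw[i+1] if k[1]=='NOUN']
--         n+= len(list(set(ws1) & set(ws2)))
--     return n
-- ===== SOURCE B (Python) =====
-- def Cohes_1(words):
--     wsw = [[[item['lemma'], item['pos']] for item in snt] for snt in words]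
--     nouns = [[k[0] for k in rows if k[1] == 'NOUN'] for rows in wsw]
--     lemmas = set()
--     for ws in nouns:
--         lemmas |= set(ws)
--     total = 0
--     for l in lemmas:
--         total += sum(1 for i in range(len(nouns) - 1)
--                      if l in nouns[i] and l in nouns[i + 1])
--     return total
-- ===== Notes on version B (the rewrite author's own statement) =====
-- stated objective: alternative
-- what changed: B inverts the iteration: it collects the set of all distinct noun lemmas once and, for each lemma, counts the adjacent sentence pairs that both contain it, instead of A's loop that intersects the noun sets of each consecutive sentence pair.
import Mathlib
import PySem

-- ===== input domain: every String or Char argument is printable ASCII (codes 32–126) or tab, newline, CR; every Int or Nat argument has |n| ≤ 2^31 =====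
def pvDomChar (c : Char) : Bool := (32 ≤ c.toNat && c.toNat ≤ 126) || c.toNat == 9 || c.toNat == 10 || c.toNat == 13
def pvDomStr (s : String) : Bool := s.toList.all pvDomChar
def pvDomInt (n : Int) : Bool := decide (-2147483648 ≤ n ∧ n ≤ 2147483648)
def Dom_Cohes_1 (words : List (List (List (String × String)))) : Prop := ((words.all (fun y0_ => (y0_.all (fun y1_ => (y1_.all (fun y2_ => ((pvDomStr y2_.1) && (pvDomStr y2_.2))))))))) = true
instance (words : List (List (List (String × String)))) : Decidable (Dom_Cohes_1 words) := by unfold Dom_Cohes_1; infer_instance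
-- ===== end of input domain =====

-- ===== PORT A =====

-- B inverts the iteration: one pass collects the set of all distinct noun lemmas,
-- then for each lemma it counts the adjacent sentence pairs containing it
-- (A instead intersects the two noun sets of every consecutive sentence pair).

-- ===== PORT A =====
-- [[item['lemma'], item['pos']] for item in snt]: first-match dict lookups; Pre_
-- guarantees both keys exist, so getD with default "" is exact there.
def pvRows (snt : List (List (String × String))) : List (String × String) :=
  snt.map (fun item =>
    ((PySem.Dict.mk item).getD "lemma" "", (PySem.Dict.mk item).getD "pos" ""))

-- [k[0] for k in rows if k[1]=='NOUN']  (used by both Pythons, verbatim)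
def pvNouns (rows : List (String × String)) : List String :=
  (rows.filter (fun k => k.2 == "NOUN")).map (·.1)

def Cohes_1 (words : List (List (List (String × String)))) : Int :=
  let wsw := words.map pvRows
  (PySem.List.pyRange 0 ((wsw.length : Int) - 1) 1).foldl (fun n i =>
    let ws1 := pvNouns (PySem.List.pyGetD wsw i [])
    let ws2 := pvNouns (PySem.List.pyGetD wsw (i+1) [])
    n + ((PySem.Set.inter (PySem.Set.ofList ws1) (PySem.Set.ofList ws2)).length : Int)) 0

-- ===== PORT B =====
-- 'lemmas' is a Python set consumed only by summing ints, so hash order is immaterial.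
def Cohes_1_alt (words : List (List (List (String × String)))) : Int :=
  let wsw := words.map pvRows
  let nouns := wsw.map pvNouns
  let lemmas : PySem.Set String :=
    nouns.foldl (fun s ws => PySem.Set.union s (PySem.Set.ofList ws)) PySem.Set.empty
  lemmas.foldl (fun total l =>
    total + (((PySem.List.pyRange 0 ((nouns.length : Int) - 1) 1).countP (fun i =>
        (PySem.List.pyGetD nouns i []).contains l
          && (PySem.List.pyGetD nouns (i+1) []).contains l)) : Int)) 0

-- ===== PRECONDITION & SPEC =====
-- Pre_ excludes items missing the 'lemma' or 'pos' key, on which Python A (and B) raise KeyError.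
def Pre_Cohes_1 (words : List (List (List (String × String)))) : Prop :=
  (words.all (fun snt => snt.all (fun item =>
    item.any (fun p => p.1 == "lemma") && item.any (fun p => p.1 == "pos")))) = true
instance (words : List (List (List (String × String)))) : Decidable (Pre_Cohes_1 words) := by unfold Pre_Cohes_1; infer_instance
def pvWitness_Cohes_1 : (List (List (List (String × String)))) :=
  [[[("lemma", "cat"), ("pos", "NOUN")]], [[("lemma", "cat"), ("pos", "NOUN")]]]

def Spec_Cohes_1 (words : List (List (List (String × String)))) (out : Int) : Prop := out = Cohes_1_alt words
instance (words : List (List (List (String × String)))) (out : Int) : Decidable (Spec_Cohes_1 words out) := by unfold Spec_Cohes_1; infer_instance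

-- ===== CLAIM =====
def Claim_equal_Cohes_1 : Prop := ∀ (words : List (List (List (String × String)))), Dom_Cohes_1 words → Pre_Cohes_1 words → Spec_Cohes_1 words (Cohes_1 words)

-- ===== LEMMAS AND PROOFS =====

-- membership in the accumulated union of the noun lists
theorem mem_foldl_union (nss : List (List String)) (s : PySem.Set String) (x : String) :
    x ∈ nss.foldl (fun s ws => PySem.Set.union s (PySem.Set.ofList ws)) s
      ↔ x ∈ s ∨ ∃ ws ∈ nss, x ∈ ws := by
  induction nss generalizing s with
  | nil => simp
  | cons a t ih =>
    simp only [List.foldl_cons, ih, PySem.Set.mem_union, PySem.Set.mem_ofList,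
      List.mem_cons]
    constructor
    · rintro ((h | h) | ⟨ws, hws, hx⟩)
      · exact Or.inl h
      · exact Or.inr ⟨a, Or.inl rfl, h⟩
      · exact Or.inr ⟨ws, Or.inr hws, hx⟩
    · rintro (h | ⟨ws, (rfl | hws), hx⟩)
      · exact Or.inl (Or.inl h)
      · exact Or.inl (Or.inr hx)
      · exact Or.inr ⟨ws, hws, hx⟩

theorem nodup_foldl_union (nss : List (List String)) (s : PySem.Set String)
    (h : List.Nodup s) :
    List.Nodup (nss.foldl (fun s ws => PySem.Set.union s (PySem.Set.ofList ws)) s) := by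
  induction nss generalizing s with
  | nil => exact h
  | cons a t ih => exact ih _ (PySem.Set.nodup_union _ _ h)

-- per pair: |set(ws1) & set(ws2)| counted through any nodup list covering ws1
theorem inter_len_eq_countP (ws1 ws2 lemmas : List String) (hnd : lemmas.Nodup)
    (h1 : ∀ x ∈ ws1, x ∈ lemmas) :
    (PySem.Set.inter (PySem.Set.ofList ws1) (PySem.Set.ofList ws2)).length
      = lemmas.countP (fun l => ws1.contains l && ws2.contains l) := by
  rw [List.countP_eq_length_filter]
  apply List.Perm.length_eq
  rw [List.perm_ext_iff_of_nodup
      (PySem.Set.nodup_inter _ _ (PySem.Set.nodup_ofList ws1)) (hnd.filter _)]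
  intro a
  simp only [PySem.Set.mem_inter, PySem.Set.mem_ofList, List.mem_filter,
    Bool.and_eq_true, List.contains_iff_mem]
  exact ⟨fun h => ⟨h1 a h.1, h⟩, fun h => h.2⟩

-- double counting: Σ_{x∈xs} |{y ∈ ys : c x y}| = Σ_{y∈ys} |{x ∈ xs : c x y}|
theorem sum_countP_comm {α β : Type} (xs : List α) (ys : List β) (c : α → β → Bool) :
    (xs.map (fun x => ((ys.countP (c x)) : Int))).sum
      = (ys.map (fun y => ((xs.countP (fun x => c x y)) : Int))).sum := by
  induction xs with
  | nil => simp
  | cons a t ih =>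
    simp only [List.map_cons, List.sum_cons, List.countP_cons, ih]
    have hsplit : (ys.map (fun y =>
          ((t.countP (fun x => c x y) + if c a y = true then 1 else 0 : Nat) : Int))).sum
        = (ys.map (fun y => ((t.countP (fun x => c x y) : Nat) : Int)
            + (if c a y = true then (1 : Int) else 0))).sum := by
      congr 1
      apply List.map_congr_left
      intro y _
      split <;> push_cast <;> ring
    rw [hsplit, PySem.List.sum_map_add_int, PySem.List.sum_map_ite_one_zero]
    ring

-- the whole equivalence, stated over the shared row table
theorem cohes_aux (wsw : List (List (String × String))) :
    (PySem.List.pyRange 0 ((wsw.length : Int) - 1) 1).foldl (fun n i =>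
      n + ((PySem.Set.inter
        (PySem.Set.ofList (pvNouns (PySem.List.pyGetD wsw i [])))
        (PySem.Set.ofList (pvNouns (PySem.List.pyGetD wsw (i+1) [])))).length : Int)) 0
    = ((wsw.map pvNouns).foldl (fun s ws => PySem.Set.union s (PySem.Set.ofList ws))
        PySem.Set.empty).foldl (fun total l =>
      total + (((PySem.List.pyRange 0 (((wsw.map pvNouns).length : Int) - 1) 1).countP (fun i =>
        (PySem.List.pyGetD (wsw.map pvNouns) i []).contains l
          && (PySem.List.pyGetD (wsw.map pvNouns) (i+1) []).contains l)) : Int)) 0 := by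
  have hget : ∀ i : Int, PySem.List.pyGetD (wsw.map pvNouns) i []
      = pvNouns (PySem.List.pyGetD wsw i []) := by
    intro i
    rw [show ([] : List String) = pvNouns [] from rfl, PySem.List.pyGetD_map]
  have hnd : List.Nodup ((wsw.map pvNouns).foldl
      (fun s ws => PySem.Set.union s (PySem.Set.ofList ws)) PySem.Set.empty) :=
    nodup_foldl_union _ _ List.nodup_nil
  rw [PySem.List.foldl_add, PySem.List.foldl_add, zero_add, zero_add]
  simp only [hget, List.length_map]
  rw [← sum_countP_comm]
  apply congrArg List.sum
  apply List.map_congr_left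
  intro i hi
  rw [PySem.List.mem_pyRange_one] at hi
  have hin : PySem.Raise.InRange wsw.length i := by
    constructor <;> omega
  have hmem : ∀ x ∈ pvNouns (PySem.List.pyGetD wsw i []),
      x ∈ (wsw.map pvNouns).foldl
        (fun s ws => PySem.Set.union s (PySem.Set.ofList ws)) PySem.Set.empty := by
    intro x hx
    rw [mem_foldl_union]
    exact Or.inr ⟨pvNouns (PySem.List.pyGetD wsw i []),
      List.mem_map_of_mem (PySem.List.pyGetD_mem wsw [] hin), hx⟩
  exact congrArg (Int.ofNat) (inter_len_eq_countP _ _ _ hnd hmem)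

-- ===== VERDICT =====
theorem Cohes_1_spec : Claim_equal_Cohes_1 := by
  intro words _ _
  show Cohes_1 words = Cohes_1_alt words
  exact cohes_aux (words.map pvRows)
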